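-- pv_equiv track=rewrite | github.com/sipa/ezbase32 | ezbase32.py | datachecksum
-- ===== SOURCE A (Python) =====
-- def rstable(x):
--     t = ((x << 1) ^ x) << 1 ^ x
--     h = x >> 4 | (t >> 7) << 10 | (t >> 9) << 20
--     return ((x & 0xF) << 6 | ((t & 0x7F) | (t & 0x1FF) << 8) << 13) ^ h ^ (h << 3)
--
-- def rsupdate(crc, data):
--     return ((crc & 0xFFFFF) << 10) ^ rstable((crc >> 20) ^ data)
--
-- def datachecksum(headercrc, data5):
--     crc = rsupdate(headercrc, len(data5) + 1)
--     pos = 0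
--     if (len(data5) & 1):
--         crc = rsupdate(crc, data5[0])
--         pos = 1
--     while pos < len(data5):
--         crc = rsupdate(crc, data5[pos] << 5 | data5[pos + 1])
--         pos += 2
--     return crc
-- ===== SOURCE B (Python) =====
-- def rstable(x):
--     t = ((x << 1) ^ x) << 1 ^ x
--     h = x >> 4 | (t >> 7) << 10 | (t >> 9) << 20
--     return ((x & 0xF) << 6 | ((t & 0x7F) | (t & 0x1FF) << 8) << 13) ^ h ^ (h << 3)
--
-- def rsupdate(crc, data):
--     return ((crc & 0xFFFFF) << 10) ^ rstable((crc >> 20) ^ data)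
--
-- def datachecksum(headercrc, data5):
--     # Streaming state machine: walk the symbols one at a time, keeping a pending
--     # half-word; a full pair flushes through rsupdate.  An odd-length input is
--     # handled uniformly by seeding the pending half-word with 0, since
--     # 0 << 5 | x == x.  No indexing, no in-loop odd special case.
--     crc = rsupdate(headercrc, len(data5) + 1)
--     pending = 0 if len(data5) % 2 else None
--     for s in data5:
--         if pending is None:
--             pending = s
--         else:
--             crc = rsupdate(crc, pending << 5 | s)
--             pending = None
--     return crc
-- ===== Notes on version B (the rewrite author's own statement) =====
-- stated objective: alternative
-- what changed: B replaces A's pair-indexed loop (index stepping by 2 with an inline odd-length prefix case) by a per-symbol streaming state machine that carries an optional pending half-word and flushes a pair through rsupdate when it fills; odd length is handled uniformly by seeding the pending half-word with 0 (0<<5|x == x) instead of a separate first-symbol update.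
import Mathlib
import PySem

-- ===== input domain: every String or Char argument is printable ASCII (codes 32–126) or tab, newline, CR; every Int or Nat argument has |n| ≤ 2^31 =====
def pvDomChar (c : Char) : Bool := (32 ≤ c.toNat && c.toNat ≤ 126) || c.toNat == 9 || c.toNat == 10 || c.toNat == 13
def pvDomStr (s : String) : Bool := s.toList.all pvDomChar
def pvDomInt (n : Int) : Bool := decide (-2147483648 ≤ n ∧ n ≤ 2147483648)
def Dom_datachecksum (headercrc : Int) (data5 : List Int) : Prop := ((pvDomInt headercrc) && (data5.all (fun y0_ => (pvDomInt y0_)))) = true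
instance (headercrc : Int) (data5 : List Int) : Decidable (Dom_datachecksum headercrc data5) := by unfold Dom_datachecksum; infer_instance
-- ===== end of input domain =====

-- B replaces A's pair-indexed loop by a per-symbol streaming state machine with an
-- optional pending half-word (odd length seeded with pending = 0); objective: alternative.

-- ===== PORT A =====
def rstable (x : Int) : Int :=
  let t := PySem.Int.bxor (PySem.Int.bxor (x <<< 1) x <<< 1) x
  let h := PySem.Int.bor (PySem.Int.bor (x >>> 4) ((t >>> 7) <<< 10)) ((t >>> 9) <<< 20)
  PySem.Int.bxor (PySem.Int.bxor
    (PySem.Int.bor ((PySem.Int.band x 0xF) <<< 6)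
      ((PySem.Int.bor (PySem.Int.band t 0x7F) ((PySem.Int.band t 0x1FF) <<< 8)) <<< 13))
    h) (h <<< 3)

def rsupdate (crc data : Int) : Int :=
  PySem.Int.bxor ((PySem.Int.band crc 0xFFFFF) <<< 10) (rstable (PySem.Int.bxor (crc >>> 20) data))

-- the while loop of A: consumes the remaining suffix two symbols at a time, carrying crc
def dcLoop (crc : Int) : List Int → Int
  | x :: y :: rest => dcLoop (rsupdate crc (PySem.Int.bor (x <<< 5) y)) rest
  | _ => crc

def datachecksum (headercrc : Int) (data5 : List Int) : Int :=
  let crc := rsupdate headercrc ((data5.length : Int) + 1)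
  if PySem.Int.band (data5.length : Int) 1 ≠ 0 then
    match data5 with
    | x :: rest => dcLoop (rsupdate crc x) rest
    | [] => crc  -- unreachable: an odd-length list is nonempty
  else
    dcLoop crc data5

-- ===== PORT B =====
-- loop body of Source B: state is (crc, pending half-word)
def altStep : Int × Option Int → Int → Int × Option Int
  | (crc, none), s => (crc, some s)
  | (crc, some p), s => (rsupdate crc (PySem.Int.bor (p <<< 5) s), none)

def datachecksum_alt (headercrc : Int) (data5 : List Int) : Int :=
  let crc := rsupdate headercrc ((data5.length : Int) + 1)
  let pending : Option Int := if data5.length % 2 ≠ 0 then some 0 else none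
  (data5.foldl altStep (crc, pending)).1

-- ===== PRECONDITION & SPEC =====
def Spec_datachecksum (headercrc : Int) (data5 : List Int) (out : Int) : Prop := out = datachecksum_alt headercrc data5
instance (headercrc : Int) (data5 : List Int) (out : Int) : Decidable (Spec_datachecksum headercrc data5 out) := by unfold Spec_datachecksum; infer_instance

-- ===== CLAIM (what is proved, stated in full; the proofs are below) =====
def Claim_equal_datachecksum : Prop := ∀ (headercrc : Int) (data5 : List Int), Dom_datachecksum headercrc data5 → Spec_datachecksum headercrc data5 (datachecksum headercrc data5)

-- ===== LEMMAS AND PROOFS =====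
-- B's fold from the empty-pending state computes A's pair loop
theorem foldl_altStep_none : ∀ (xs : List Int) (crc : Int),
    (xs.foldl altStep (crc, none)).1 = dcLoop crc xs
  | [], crc => rfl
  | [x], crc => rfl
  | x :: y :: rest, crc => by
      simp only [List.foldl_cons, altStep, dcLoop]
      exact foldl_altStep_none rest _

theorem bor_zero_shift (x : Int) : PySem.Int.bor ((0 : Int) <<< 5) x = x := by
  have h5 : ((0 : Int) <<< 5) = 0 := by decide
  rw [h5, PySem.Int.bor_comm, PySem.Int.bor_zero]

-- ===== VERDICT (by name: the statement is the Claim_ definition above) =====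
theorem datachecksum_spec : Claim_equal_datachecksum := by
  intro headercrc data5 _
  unfold Spec_datachecksum datachecksum datachecksum_alt
  have hband : PySem.Int.band (data5.length : Int) 1 = ((data5.length % 2 : Nat) : Int) := by
    simpa [Nat.and_one_is_mod] using PySem.Int.band_natCast data5.length 1
  rcases Nat.even_or_odd data5.length with he | ho
  · have h2 : data5.length % 2 = 0 := Nat.even_iff.mp he
    have h0 : PySem.Int.band (data5.length : Int) 1 = 0 := by rw [hband, h2]; rfl
    simp [h0, h2, foldl_altStep_none]
  · have h2 : data5.length % 2 = 1 := Nat.odd_iff.mp ho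
    have h1 : PySem.Int.band (data5.length : Int) 1 = 1 := by rw [hband, h2]; rfl
    match data5 with
    | x :: rest =>
      simp only [h1, h2, if_pos (by decide : (1:Int) ≠ 0), if_pos (by decide : (1:Nat) ≠ 0),
        List.foldl_cons, altStep, bor_zero_shift]
      exact (foldl_altStep_none rest _).symm
    | [] => simp at h2
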